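-- pv_equiv track=rewrite | github.com/chavdar12/Python-Advanced | 003-Tuples-And-Sets/005.py | order_no_shows
-- ===== SOURCE A (Python) =====
-- def order_no_shows(guest_list):
--     vips = []
--     regulars = []
--
--     for guest in guest_list:
--         if guest[0].isdigit():
--             vips.append(guest)
--         else:
--             regulars.append(guest)
--
--     vips_sorted = sorted(vips)
--     regulars_sorted = sorted(regulars)
--
--     return vips_sorted + regulars_sorted
-- ===== SOURCE B (Python) =====
-- def order_no_shows(guest_list):
--     return sorted(guest_list, key=lambda g: (0 if g[0].isdigit() else 1, g))
-- ===== Notes on version B (the rewrite author's own statement) =====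
-- stated objective: idiomatic
-- what changed: Replaces the explicit two-bucket partition loop plus two separate sorts with a single sorted() call over the whole list using the composite key (digit-start group, guest string).
import Mathlib
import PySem

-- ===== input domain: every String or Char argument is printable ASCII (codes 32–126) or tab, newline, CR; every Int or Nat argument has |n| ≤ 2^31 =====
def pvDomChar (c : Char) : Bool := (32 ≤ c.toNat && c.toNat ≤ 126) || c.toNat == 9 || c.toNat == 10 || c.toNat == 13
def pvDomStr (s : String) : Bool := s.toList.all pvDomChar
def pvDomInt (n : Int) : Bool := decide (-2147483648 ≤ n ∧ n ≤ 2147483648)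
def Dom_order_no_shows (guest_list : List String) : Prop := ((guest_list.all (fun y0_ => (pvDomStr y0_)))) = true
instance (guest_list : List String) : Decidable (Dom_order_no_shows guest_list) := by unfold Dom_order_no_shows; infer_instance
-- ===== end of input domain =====

-- B replaces A's two-bucket partition loop and two sorts by one sorted() call with the composite key (digit-start group, guest): more idiomatic, same cost.


-- ===== PORT A =====
-- guest[0].isdigit() — shared by both ports; `none` (Python IndexError on "") is excluded by Pre_, the `false` default is never reached there
def pvStartsDigit (g : String) : Bool :=
  match PySem.Str.pyGet? g 0 with
  | some c => PySem.Chars.isdigit c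
  | none => false

def order_no_shows (guest_list : List String) : List String :=
  let vr := guest_list.foldl
    (fun acc guest =>
      if pvStartsDigit guest then (acc.1 ++ [guest], acc.2) else (acc.1, acc.2 ++ [guest]))
    ([], [])
  PySem.List.sorted vr.1 (fun x => x) false ++ PySem.List.sorted vr.2 (fun x => x) false

-- ===== PORT B =====
def order_no_shows_alt (guest_list : List String) : List String :=
  PySem.List.sorted2 guest_list (fun g => if pvStartsDigit g then (0 : Int) else 1) (fun g => g) false

-- ===== PRECONDITION & SPEC =====
-- Pre_ excludes lists containing the empty string, on which Python A raises IndexError at guest[0]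
def Pre_order_no_shows (guest_list : List String) : Prop := ∀ g ∈ guest_list, g ≠ ""
instance (guest_list : List String) : Decidable (Pre_order_no_shows guest_list) := by unfold Pre_order_no_shows; infer_instance
def pvWitness_order_no_shows : List String := ["2pm - Bob", "Alice", "10am", "carl"]

def Spec_order_no_shows (guest_list : List String) (out : List String) : Prop := out = order_no_shows_alt guest_list
instance (guest_list : List String) (out : List String) : Decidable (Spec_order_no_shows guest_list out) := by unfold Spec_order_no_shows; infer_instance

-- ===== CLAIM (what is proved, stated in full; the proofs are below) =====
def Claim_equal_order_no_shows : Prop := ∀ (guest_list : List String), Dom_order_no_shows guest_list → Pre_order_no_shows guest_list → Spec_order_no_shows guest_list (order_no_shows guest_list)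

-- ===== LEMMAS AND PROOFS =====

-- the two comparators, named for the proofs: plain string order, and B's composite (group, string) order
def pvLtS : String → String → Bool := fun a b => decide (a < b)
def pvKey1 (g : String) : Int := if pvStartsDigit g then 0 else 1
def pvLt : String → String → Bool := fun a b =>
  decide (pvKey1 a < pvKey1 b) || (!decide (pvKey1 b < pvKey1 a) && decide (a < b))

theorem pv_insertBy_congr {α : Type} (b1 b2 : α → α → Bool) (x : α) (ys : List α)
    (h : ∀ y ∈ ys, b1 x y = b2 x y) : PySem.List.insertBy b1 x ys = PySem.List.insertBy b2 x ys := by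
  induction ys with
  | nil => rfl
  | cons y ys ih =>
    simp only [PySem.List.insertBy]
    rw [h y (List.mem_cons_self), ih (fun z hz => h z (List.mem_cons_of_mem _ hz))]

theorem pv_insertBy_append_right {α : Type} (before : α → α → Bool) (x : α) (V R : List α)
    (h : ∀ r ∈ R, before x r = true) :
    PySem.List.insertBy before x (V ++ R) = PySem.List.insertBy before x V ++ R := by
  induction V with
  | nil =>
    cases R with
    | nil => rfl
    | cons r R => simp [PySem.List.insertBy, h r (List.mem_cons_self)]
  | cons v V ih =>
    simp only [List.cons_append, PySem.List.insertBy]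
    by_cases hv : before x v = true
    · simp [hv]
    · simp only [Bool.not_eq_true] at hv
      simp [hv, ih]

theorem pv_insertBy_append_left {α : Type} (before : α → α → Bool) (x : α) (V R : List α)
    (h : ∀ v ∈ V, before x v = false) :
    PySem.List.insertBy before x (V ++ R) = V ++ PySem.List.insertBy before x R := by
  induction V with
  | nil => rfl
  | cons v V ih =>
    simp only [List.cons_append, PySem.List.insertBy, h v (List.mem_cons_self)]
    simp [ih (fun z hz => h z (List.mem_cons_of_mem _ hz))]

theorem pv_lt_vip_vip (x v : String) (hx : pvStartsDigit x = true) (hv : pvStartsDigit v = true) :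
    pvLt x v = pvLtS x v := by simp [pvLt, pvLtS, pvKey1, hx, hv]

theorem pv_lt_vip_reg (x r : String) (hx : pvStartsDigit x = true) (hr : pvStartsDigit r = false) :
    pvLt x r = true := by simp [pvLt, pvKey1, hx, hr]

theorem pv_lt_reg_vip (x v : String) (hx : pvStartsDigit x = false) (hv : pvStartsDigit v = true) :
    pvLt x v = false := by simp [pvLt, pvKey1, hx, hv]

theorem pv_lt_reg_reg (x r : String) (hx : pvStartsDigit x = false) (hr : pvStartsDigit r = false) :
    pvLt x r = pvLtS x r := by simp [pvLt, pvLtS, pvKey1, hx, hr]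

theorem pv_main (xs : List String) : ∀ (V R : List String),
    (∀ v ∈ V, pvStartsDigit v = true) → (∀ r ∈ R, pvStartsDigit r = false) →
    xs.foldl (fun acc x => PySem.List.insertBy pvLt x acc) (V ++ R)
      = (xs.filter pvStartsDigit).foldl (fun acc x => PySem.List.insertBy pvLtS x acc) V
        ++ (xs.filter (fun g => !pvStartsDigit g)).foldl (fun acc x => PySem.List.insertBy pvLtS x acc) R := by
  induction xs with
  | nil => intro V R _ _; rfl
  | cons x xs ih =>
    intro V R hV hR
    by_cases hx : pvStartsDigit x = true
    · have h1 : PySem.List.insertBy pvLt x (V ++ R) = PySem.List.insertBy pvLtS x V ++ R := by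
        rw [pv_insertBy_append_right pvLt x V R (fun r hr => pv_lt_vip_reg x r hx (hR r hr))]
        rw [pv_insertBy_congr pvLt pvLtS x V (fun v hv => pv_lt_vip_vip x v hx (hV v hv))]
      have hV' : ∀ v ∈ PySem.List.insertBy pvLtS x V, pvStartsDigit v = true := by
        intro v hv
        rcases (PySem.List.mem_insertBy _ _ _ _).1 hv with h | h
        · exact h ▸ hx
        · exact hV v h
      simp only [List.foldl_cons, h1, List.filter_cons, hx, Bool.not_true, if_true]
      simpa using ih (PySem.List.insertBy pvLtS x V) R hV' hR
    · simp only [Bool.not_eq_true] at hx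
      have h1 : PySem.List.insertBy pvLt x (V ++ R) = V ++ PySem.List.insertBy pvLtS x R := by
        rw [pv_insertBy_append_left pvLt x V R (fun v hv => pv_lt_reg_vip x v hx (hV v hv))]
        rw [pv_insertBy_congr pvLt pvLtS x R (fun r hr => pv_lt_reg_reg x r hx (hR r hr))]
      have hR' : ∀ r ∈ PySem.List.insertBy pvLtS x R, pvStartsDigit r = false := by
        intro r hr
        rcases (PySem.List.mem_insertBy _ _ _ _).1 hr with h | h
        · exact h ▸ hx
        · exact hR r h
      simp only [List.foldl_cons, h1, List.filter_cons, hx, Bool.not_false]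
      simpa using ih V (PySem.List.insertBy pvLtS x R) hV hR'

theorem pv_partition (guest_list : List String) :
    guest_list.foldl
      (fun acc guest =>
        if pvStartsDigit guest then (acc.1 ++ [guest], acc.2) else (acc.1, acc.2 ++ [guest]))
      (([] : List String), ([] : List String))
    = (guest_list.filter pvStartsDigit, guest_list.filter (fun g => !pvStartsDigit g)) := by
  have hfun : (fun (acc : List String × List String) guest =>
        if pvStartsDigit guest then (acc.1 ++ [guest], acc.2) else (acc.1, acc.2 ++ [guest]))
      = (fun acc guest =>
        ((if pvStartsDigit guest then acc.1 ++ [guest] else acc.1),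
         (if !pvStartsDigit guest then acc.2 ++ [guest] else acc.2))) := by
    funext acc guest
    by_cases h : pvStartsDigit guest = true <;> simp [h]
  rw [hfun]
  rw [PySem.List.foldl_prod_mk
      (f := fun acc guest => if pvStartsDigit guest then acc ++ [guest] else acc)
      (g := fun acc guest => if !pvStartsDigit guest then acc ++ [guest] else acc)]
  rw [PySem.List.foldl_append_if_eq_filter, PySem.List.foldl_append_if_eq_filter]
  simp

-- ===== VERDICT (by name: the statement is the Claim_ definition above) =====
theorem order_no_shows_spec : Claim_equal_order_no_shows := by
  intro guest_list _ _
  unfold Spec_order_no_shows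
  simp only [order_no_shows, order_no_shows_alt]
  rw [pv_partition]
  have hA : ∀ ys : List String,
      PySem.List.sorted ys (fun x => x) false
        = ys.foldl (fun acc x => PySem.List.insertBy pvLtS x acc) [] :=
    fun ys => PySem.List.sorted_eq_foldl_insertBy ys (fun x => x)
  have hB : PySem.List.sorted2 guest_list (fun g => if pvStartsDigit g then (0 : Int) else 1)
        (fun g => g) false
      = guest_list.foldl (fun acc x => PySem.List.insertBy pvLt x acc) [] := rfl
  rw [hB, hA, hA]
  have := pv_main guest_list [] [] (by simp) (by simp)
  simpa using this.symm
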